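-- pv_equiv track=rewrite | github.com/dglowacki/mega-agent-v2 | mcp/voice/formatter.py | _simplify_technical
-- ===== SOURCE A (Python) =====
-- def _simplify_technical(text: str) -> str:
--     """Simplify technical terms for voice."""
--     replacements = {
--         "repository": "repo",
--         "pull request": "PR",
--         "null": "none",
--         "undefined": "not set",
--         "[]": "empty list",
--         "{}": "empty",
--     }
--     for old, new in replacements.items():
--         text = text.replace(old, new)
--     return text
-- ===== SOURCE B (Python) =====
-- def _simplify_technical(text: str) -> str:
--     """Simplify technical terms for voice: one left-to-right scan with a match table."""
--     table = [
--         (list("repository"), list("repo")),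
--         (list("pull request"), list("PR")),
--         (list("null"), list("none")),
--         (list("undefined"), list("not set")),
--         (list("[]"), list("empty list")),
--         (list("{}"), list("empty")),
--     ]
--     chars = list(text)
--     out = []
--     i = 0
--     n = len(chars)
--     while i < n:
--         hit = None
--         for key, val in table:
--             if chars[i:i + len(key)] == key:
--                 hit = (key, val)
--                 break
--         if hit is not None:
--             out.extend(hit[1])
--             i += len(hit[0])
--         else:
--             out.append(chars[i])
--             i += 1
--     return "".join(out)
-- ===== Notes on version B (the rewrite author's own statement) =====
-- stated objective: alternative
-- what changed: Replaces six sequential whole-text .replace() passes by one left-to-right scan over the character list that at each position emits the first matching key's replacement; correct because no key overlaps another key and no replacement value re-introduces or completes a key.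
import Mathlib
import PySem

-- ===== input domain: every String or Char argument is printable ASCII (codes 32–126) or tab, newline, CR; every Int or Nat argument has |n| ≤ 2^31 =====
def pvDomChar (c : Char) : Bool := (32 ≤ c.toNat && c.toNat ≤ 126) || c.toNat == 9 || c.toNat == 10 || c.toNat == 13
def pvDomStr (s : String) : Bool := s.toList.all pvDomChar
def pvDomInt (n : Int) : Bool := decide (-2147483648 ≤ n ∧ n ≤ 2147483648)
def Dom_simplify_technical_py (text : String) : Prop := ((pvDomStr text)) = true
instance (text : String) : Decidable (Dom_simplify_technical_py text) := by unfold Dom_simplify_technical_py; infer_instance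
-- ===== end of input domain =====

-- B replaces A's six sequential whole-text .replace passes by one left-to-right scan with a
-- first-match table lookup at each position (objective: alternative; equal output proved below).

-- ===== PORT A =====
-- 'for old, new in replacements.items(): text = text.replace(old, new)' = a fold over the dict items
def simplify_technical_py (text : String) : String :=
  [("repository", "repo"), ("pull request", "PR"), ("null", "none"),
   ("undefined", "not set"), ("[]", "empty list"), ("{}", "empty")].foldl
    (fun t kv => PySem.Str.replace t kv.1 kv.2) text

-- ===== PORT B =====
-- Source B's table of (key, value) character lists, built by list(...) from the literals
def pvVoiceTable : List (List Char × List Char) :=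
  [(['r', 'e', 'p', 'o', 's', 'i', 't', 'o', 'r', 'y'], ['r', 'e', 'p', 'o']),
   (['p', 'u', 'l', 'l', ' ', 'r', 'e', 'q', 'u', 'e', 's', 't'], ['P', 'R']),
   (['n', 'u', 'l', 'l'], ['n', 'o', 'n', 'e']),
   (['u', 'n', 'd', 'e', 'f', 'i', 'n', 'e', 'd'], ['n', 'o', 't', ' ', 's', 'e', 't']),
   (['[', ']'], ['e', 'm', 'p', 't', 'y', ' ', 'l', 'i', 's', 't']),
   (['{', '}'], ['e', 'm', 'p', 't', 'y'])]

-- the inner for-loop with break: the first table entry whose key matches at the current position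
-- ('chars[i:i+len(key)] == key' is exactly 'key is a prefix of the remaining characters')
def pvFindKey (tbl : List (List Char × List Char)) (l : List Char) : Option (List Char × List Char) :=
  tbl.find? (fun kv => kv.1.isPrefixOf l)

-- Source B's while-loop over index i, transcribed on the remaining character list; 'i += len(key)'
-- drops len(key) characters (every key of the table is nonempty, so 'k.length - 1' dropped
-- from the tail = k.length dropped from the list).
def pvScan (tbl : List (List Char × List Char)) : List Char → List Char
  | [] => []
  | c :: t =>
    match pvFindKey tbl (c :: t) with
    | some kv => kv.2 ++ pvScan tbl (t.drop (kv.1.length - 1))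
    | none => c :: pvScan tbl t
  termination_by l => l.length
  decreasing_by all_goals (simp; try omega)

def simplify_technical_py_alt (text : String) : String :=
  String.ofList (pvScan pvVoiceTable text.toList)

-- ===== PRECONDITION & SPEC =====
def Spec_simplify_technical_py (text : String) (out : String) : Prop := out = simplify_technical_py_alt text
instance (text : String) (out : String) : Decidable (Spec_simplify_technical_py text out) := by unfold Spec_simplify_technical_py; infer_instance

-- ===== CLAIM (what is proved, stated in full; the proofs are below) =====
def Claim_equal_simplify_technical_py : Prop := ∀ (text : String), Dom_simplify_technical_py text → Spec_simplify_technical_py text (simplify_technical_py text)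

-- ===== LEMMAS AND PROOFS =====

-- clean recursive form of one str.replace (old nonempty)
def pvRepl (k v : List Char) : List Char → List Char
  | [] => []
  | c :: t =>
    if k.isPrefixOf (c :: t) then v ++ pvRepl k v (t.drop (k.length - 1))
    else c :: pvRepl k v t
  termination_by l => l.length
  decreasing_by all_goals (simp; try omega)

-- non-interaction conditions between a table entry (k, v) and a later key k'
def pvPairOK (k v k' : List Char) : Prop :=
  (∀ i, i < k'.length → 1 ≤ i → ¬(k'.drop i <+: k) ∧ ¬(k <+: k'.drop i)) ∧
  (∀ i, i < v.length → ¬(v.drop i <+: k') ∧ ¬(k' <+: v.drop i)) ∧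
  (∀ j, j < k'.length → ¬(k'.drop j <+: v) ∧ ¬(v <+: k'.drop j))

def pvGood : List (List Char × List Char) → Prop
  | [] => True
  | (k, v) :: rest => k ≠ [] ∧ (∀ kv ∈ rest, pvPairOK k v kv.1) ∧ pvGood rest

theorem pvGood_table : pvGood pvVoiceTable := by
  simp only [pvVoiceTable, pvGood, pvPairOK]
  repeat' apply And.intro
  all_goals decide

theorem pvGood_keys_ne : ∀ tbl, pvGood tbl → ∀ kv ∈ tbl, kv.1 ≠ [] := by
  intro tbl h
  induction tbl with
  | nil => intro kv hkv; cases hkv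
  | cons hd tl ih =>
    obtain ⟨k, v⟩ := hd
    intro kv hkv
    rcases List.mem_cons.mp hkv with h1 | h1
    · subst h1; exact h.1
    · exact ih h.2.2 kv h1

theorem pvPrefix_append_cases {k a b : List Char} (h : k <+: a ++ b) : k <+: a ∨ a <+: k :=
  List.prefix_or_prefix_of_prefix h (List.prefix_append a b)

-- the fuel loop of PySem.Chars.replace computes pvRepl
theorem pvReplace_go_eq (k v : List Char) (hk : k ≠ []) :
    ∀ fuel l acc, l.length ≤ fuel →
      PySem.Chars.replace.go k v fuel l acc = acc.reverse ++ pvRepl k v l := by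
  have hk1 : 1 ≤ k.length := List.length_pos_of_ne_nil hk
  intro fuel
  induction fuel with
  | zero =>
    intro l acc hl
    have hnil : l = [] := List.eq_nil_of_length_eq_zero (Nat.le_zero.mp hl)
    subst hnil
    rw [PySem.Chars.replace.go, pvRepl]
  | succ fuel ih =>
    intro l acc hl
    cases l with
    | nil => simp [PySem.Chars.replace.go, pvRepl]
    | cons c t =>
      have hl' : t.length ≤ fuel := by simp only [List.length_cons] at hl; omega
      rw [PySem.Chars.replace.go, pvRepl]
      by_cases hp : k.isPrefixOf (c :: t) = true
      · simp only [hp, if_true]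
        have hdrop : List.drop k.length (c :: t) = t.drop (k.length - 1) := by
          obtain ⟨m, hm⟩ := Nat.exists_eq_add_of_le hk1
          rw [hm]
          simp [Nat.add_comm]
        have hb : (List.drop k.length (c :: t)).length ≤ fuel := by
          simp only [List.length_drop, List.length_cons]; omega
        rw [ih _ _ hb, hdrop]
        simp
      · simp only [hp]
        rw [ih _ _ hl']
        simp

theorem pvReplace_eq (s k v : List Char) (hk : k ≠ []) :
    PySem.Chars.replace s k v = pvRepl k v s := by
  have hne : k.isEmpty = false := by cases k with | nil => simp at hk | cons a l => simp
  rw [PySem.Chars.replace, hne]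
  simpa using pvReplace_go_eq k v hk s.length s [] le_rfl

-- pvRepl passes untouched over a region where k never matches
theorem pvRepl_skip (k v : List Char) :
    ∀ a u, (∀ i, i < a.length → ¬(k <+: (a ++ u).drop i)) →
      pvRepl k v (a ++ u) = a ++ pvRepl k v u := by
  intro a
  induction a with
  | nil => intro u _; simp
  | cons c a' ih =>
    intro u h
    have h0 : ¬(k <+: c :: (a' ++ u)) := by simpa using h 0 (by simp)
    have hp : k.isPrefixOf (c :: (a' ++ u)) = false := by
      rw [← Bool.not_eq_true, List.isPrefixOf_iff_prefix]; exact h0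
    rw [List.cons_append, pvRepl, hp]
    simp only [Bool.false_eq_true, if_false, List.cons_append, List.cons.injEq, true_and]
    exact ih u (fun i hi => by simpa using h (i + 1) (by simpa using hi))

-- any prefix of a pvRepl output that is not a prefix of the input ends in a piece related to v
theorem pvRepl_decomp (k v : List Char) :
    ∀ t w, w <+: pvRepl k v t → ¬(w <+: t) →
      ∃ z, z ≠ [] ∧ z <:+ w ∧ (z <+: v ∨ v <+: z) := by
  suffices H : ∀ n t, t.length ≤ n → ∀ w, w <+: pvRepl k v t → ¬(w <+: t) →
      ∃ z, z ≠ [] ∧ z <:+ w ∧ (z <+: v ∨ v <+: z) by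
    exact fun t w h1 h2 => H t.length t le_rfl w h1 h2
  intro n
  induction n with
  | zero =>
    intro t ht w h1 h2
    have : t = [] := List.eq_nil_of_length_eq_zero (Nat.le_zero.mp ht)
    subst this
    rw [pvRepl] at h1
    exact absurd (List.prefix_nil.mp h1 ▸ List.nil_prefix) h2
  | succ n ih =>
    intro t ht w h1 h2
    have hwne : w ≠ [] := fun h => h2 (h ▸ List.nil_prefix)
    cases t with
    | nil =>
      rw [pvRepl] at h1
      exact absurd (List.prefix_nil.mp h1 ▸ List.nil_prefix) h2
    | cons c t' =>
      rw [pvRepl] at h1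
      by_cases hp : k.isPrefixOf (c :: t') = true
      · rw [hp, if_pos rfl] at h1
        rcases pvPrefix_append_cases h1 with hc | hc
        · exact ⟨w, hwne, List.suffix_refl w, Or.inl hc⟩
        · exact ⟨w, hwne, List.suffix_refl w, Or.inr hc⟩
      · rw [if_neg hp] at h1
        cases w with
        | nil => exact absurd rfl hwne
        | cons cw w' =>
          obtain ⟨hcw, hw'⟩ := List.cons_prefix_cons.mp h1
          have hw't : ¬(w' <+: t') := fun hc =>
            h2 (List.cons_prefix_cons.mpr ⟨hcw, hc⟩)
          obtain ⟨z, hzne, hzsuf, hzrel⟩ := ih t' (by simp at ht; omega) w' hw' hw't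
          exact ⟨z, hzne, hzsuf.trans (List.suffix_cons cw w'), hzrel⟩

theorem pvScan_skip (tbl : List (List Char × List Char)) :
    ∀ a x, (∀ i, i < a.length → ∀ kv ∈ tbl, ¬(kv.1 <+: (a ++ x).drop i)) →
      pvScan tbl (a ++ x) = a ++ pvScan tbl x := by
  intro a
  induction a with
  | nil => intro x _; simp
  | cons c a' ih =>
    intro x h
    have hnone : pvFindKey tbl (c :: (a' ++ x)) = none := by
      apply List.find?_eq_none.mpr
      intro kv hkv hp
      exact h 0 (by simp) kv hkv (by simpa using List.isPrefixOf_iff_prefix.mp hp)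
    rw [List.cons_append, pvScan, hnone]
    simp only [List.cons_append, List.cons.injEq, true_and]
    exact ih x (fun i hi kv hkv => by simpa using h (i + 1) (by simpa using hi) kv hkv)

theorem pvFind_stable (k' v' X : List Char) :
    ∀ (tbl : List (List Char × List Char)) (s : List Char),
      pvFindKey tbl s = some (k', v') →
      (∀ kv ∈ tbl, ¬(kv.1 <+: s) → ¬(kv.1 <+: k' ++ X)) →
      k' <+: k' ++ X →
      pvFindKey tbl (k' ++ X) = some (k', v') := by
  intro tbl
  induction tbl with
  | nil => intro s hfind; simp [pvFindKey] at hfind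
  | cons kv3 tl ih =>
    intro s hfind hfar hX
    unfold pvFindKey at hfind ⊢
    by_cases hp3 : kv3.1.isPrefixOf s = true
    · rw [List.find?_cons_of_pos (p := fun kv : List Char × List Char => kv.1.isPrefixOf s) hp3] at hfind
      have heq : kv3 = (k', v') := by simpa using hfind
      subst heq
      exact List.find?_cons_of_pos (p := fun kv : List Char × List Char => kv.1.isPrefixOf (k' ++ X))
        (List.isPrefixOf_iff_prefix.mpr hX)
    · have hnots : ¬(kv3.1 <+: s) := fun hc => hp3 (List.isPrefixOf_iff_prefix.mpr hc)
      have hnotX : ¬(kv3.1.isPrefixOf (k' ++ X) = true) := by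
        rw [List.isPrefixOf_iff_prefix]
        exact hfar kv3 List.mem_cons_self hnots
      rw [List.find?_cons_of_neg (p := fun kv : List Char × List Char => kv.1.isPrefixOf s) hp3] at hfind
      rw [List.find?_cons_of_neg (p := fun kv : List Char × List Char => kv.1.isPrefixOf (k' ++ X)) hnotX]
      have := ih s (by unfold pvFindKey; exact hfind)
        (fun kv hkv => hfar kv (List.mem_cons_of_mem _ hkv)) hX
      unfold pvFindKey at this
      exact this

theorem pvScan_cons_none (tbl : List (List Char × List Char)) (c : Char) (t : List Char)
    (h : pvFindKey tbl (c :: t) = none) : pvScan tbl (c :: t) = c :: pvScan tbl t := by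
  rw [pvScan, h]

theorem pvScan_head (tbl : List (List Char × List Char)) (k0 v0 X : List Char)
    (hk0 : k0 ≠ []) (hf : pvFindKey tbl (k0 ++ X) = some (k0, v0)) :
    pvScan tbl (k0 ++ X) = v0 ++ pvScan tbl X := by
  cases k0 with
  | nil => exact absurd rfl hk0
  | cons c0 kt =>
    rw [List.cons_append] at hf ⊢
    rw [pvScan, hf]
    simp only [List.length_cons, Nat.add_sub_cancel]
    rw [List.drop_left]

-- central step: scanning the rest of the table over (replace k v s) = scanning the whole table over s
theorem pvStep (k v : List Char) (rest : List (List Char × List Char))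
    (hk : k ≠ []) (hne : ∀ kv ∈ rest, kv.1 ≠ []) (hOK : ∀ kv ∈ rest, pvPairOK k v kv.1) :
    ∀ s, pvScan rest (pvRepl k v s) = pvScan ((k, v) :: rest) s := by
  have hk1 : 1 ≤ k.length := List.length_pos_of_ne_nil hk
  suffices H : ∀ n s, s.length ≤ n → pvScan rest (pvRepl k v s) = pvScan ((k, v) :: rest) s by
    exact fun s => H s.length s le_rfl
  intro n
  induction n with
  | zero =>
    intro s hs
    have : s = [] := List.eq_nil_of_length_eq_zero (Nat.le_zero.mp hs)
    subst this
    rw [pvRepl, pvScan, pvScan]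
  | succ n ih =>
    intro s hs
    cases s with
    | nil => rw [pvRepl, pvScan, pvScan]
    | cons c t =>
      simp only [List.length_cons] at hs
      by_cases hA : k.isPrefixOf (c :: t) = true
      · -- case A: k matches at the head
        obtain ⟨u, hu⟩ := List.isPrefixOf_iff_prefix.mp hA
        have hlen : k.length + u.length = t.length + 1 := by
          have := congrArg List.length hu; simpa using this
        have hdropu : t.drop (k.length - 1) = u := by
          have h1 : List.drop k.length (c :: t) = t.drop (k.length - 1) := by
            obtain ⟨m, hm⟩ := Nat.exists_eq_add_of_le hk1
            rw [hm]; simp [Nat.add_comm]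
          rw [← h1, ← hu, List.drop_left]
        have hrepl : pvRepl k v (c :: t) = v ++ pvRepl k v u := by
          rw [pvRepl, if_pos hA, hdropu]
        have hskip : pvScan rest (v ++ pvRepl k v u) = v ++ pvScan rest (pvRepl k v u) := by
          apply pvScan_skip
          intro i hi kv hkv hcon
          rw [List.drop_append_of_le_length (Nat.le_of_lt hi)] at hcon
          rcases pvPrefix_append_cases hcon with hc | hc
          · exact ((hOK kv hkv).2.1 i hi).2 hc
          · exact ((hOK kv hkv).2.1 i hi).1 hc
        have hIH : pvScan rest (pvRepl k v u) = pvScan ((k, v) :: rest) u :=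
          ih u (by omega)
        have hffull : pvFindKey ((k, v) :: rest) (k ++ u) = some (k, v) := by
          unfold pvFindKey
          exact List.find?_cons_of_pos (p := fun kv : List Char × List Char => kv.1.isPrefixOf (k ++ u))
            (List.isPrefixOf_iff_prefix.mpr (List.prefix_append k u))
        have hRHS : pvScan ((k, v) :: rest) (c :: t) = v ++ pvScan ((k, v) :: rest) u := by
          rw [← hu]
          exact pvScan_head _ k v u hk hffull
        rw [hrepl, hskip, hIH, hRHS]
      · -- k does not match at the head
        have hsnotk : ¬(k <+: c :: t) := fun hc => hA (List.isPrefixOf_iff_prefix.mpr hc)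
        cases hFK : pvFindKey rest (c :: t) with
        | some kv' =>
          obtain ⟨k', v'⟩ := kv'
          have hmem : (k', v') ∈ rest := List.mem_of_find?_eq_some hFK
          have hp' : k'.isPrefixOf (c :: t) = true := by
            have := List.find?_some hFK; simpa using this
          obtain ⟨u, hu⟩ := List.isPrefixOf_iff_prefix.mp hp'
          have hk'ne : k' ≠ [] := hne _ hmem
          have hk'1 : 1 ≤ k'.length := List.length_pos_of_ne_nil hk'ne
          have hlen : k'.length + u.length = t.length + 1 := by
            have := congrArg List.length hu; simpa using this
          have hreplskip : pvRepl k v (k' ++ u) = k' ++ pvRepl k v u := by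
            apply pvRepl_skip
            intro i hi hcon
            rcases Nat.eq_zero_or_pos i with h0 | hpos
            · subst h0; rw [List.drop_zero, hu] at hcon; exact hsnotk hcon
            · rw [List.drop_append_of_le_length (Nat.le_of_lt hi)] at hcon
              rcases pvPrefix_append_cases hcon with hc | hc
              · exact ((hOK (k', v') hmem).1 i hi hpos).2 hc
              · exact ((hOK (k', v') hmem).1 i hi hpos).1 hc
          have hfar : ∀ kv ∈ rest, ¬(kv.1 <+: c :: t) → ¬(kv.1 <+: k' ++ pvRepl k v u) := by
            intro kv hkv hnots hcon
            rcases pvPrefix_append_cases hcon with hc | hc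
            · exact hnots (hc.trans ⟨u, hu⟩)
            · obtain ⟨e, he⟩ := hc
              have hepre : e <+: pvRepl k v u := by
                rw [← he] at hcon
                exact (List.prefix_append_right_inj k').mp hcon
              have hene : e ≠ [] := by
                rintro rfl
                exact hnots (by rw [← he]; simpa using ⟨u, hu⟩)
              have hnotu : ¬(e <+: u) := by
                intro hcu
                apply hnots
                rw [← he, ← hu]
                exact (List.prefix_append_right_inj k').mpr hcu
              obtain ⟨z, hzne, hzsuf, hzrel⟩ := pvRepl_decomp k v u e hepre hnotu
              have hzkv : z <:+ kv.1 := by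
                rw [← he]; exact hzsuf.trans (List.suffix_append k' e)
              obtain ⟨p, hp2⟩ := hzkv
              have hj : p.length < kv.1.length := by
                have := congrArg List.length hp2
                have hz1 : 1 ≤ z.length := List.length_pos_of_ne_nil hzne
                simp at this; omega
              have hCb := (hOK kv hkv).2.2 p.length hj
              rw [← hp2, List.drop_left] at hCb
              rcases hzrel with hz | hz
              · exact hCb.1 hz
              · exact hCb.2 hz
          have hstable : pvFindKey rest (k' ++ pvRepl k v u) = some (k', v') :=
            pvFind_stable k' v' (pvRepl k v u) rest (c :: t) hFK hfar (List.prefix_append _ _)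
          have hLHS : pvScan rest (pvRepl k v (c :: t)) = v' ++ pvScan rest (pvRepl k v u) := by
            rw [← hu, hreplskip]
            exact pvScan_head rest k' v' _ hk'ne hstable
          have hffull : pvFindKey ((k, v) :: rest) (k' ++ u) = some (k', v') := by
            unfold pvFindKey at hFK ⊢
            rw [List.find?_cons_of_neg (p := fun kv : List Char × List Char => kv.1.isPrefixOf (k' ++ u))
              (by rw [hu]; exact hA)]
            rw [hu]; exact hFK
          have hRHS : pvScan ((k, v) :: rest) (c :: t) = v' ++ pvScan ((k, v) :: rest) u := by
            rw [← hu]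
            exact pvScan_head _ k' v' u hk'ne hffull
          rw [hLHS, hRHS, ih u (by omega)]
        | none =>
          have hreplC : pvRepl k v (c :: t) = c :: pvRepl k v t := by
            rw [pvRepl, if_neg hA]
          have hnone_s : ∀ kv ∈ rest, ¬(kv.1 <+: c :: t) := fun kv hkv hc =>
            (List.find?_eq_none.mp hFK kv hkv) (List.isPrefixOf_iff_prefix.mpr hc)
          have hnofind : pvFindKey rest (c :: pvRepl k v t) = none := by
            apply List.find?_eq_none.mpr
            intro kv hkv hp
            have hpre : kv.1 <+: c :: pvRepl k v t := List.isPrefixOf_iff_prefix.mp hp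
            cases hkv1 : kv.1 with
            | nil => exact (hne kv hkv) hkv1
            | cons c3 w =>
              rw [hkv1] at hpre
              obtain ⟨hc3, hw⟩ := List.cons_prefix_cons.mp hpre
              have hwnot : ¬(w <+: t) := fun hcw =>
                hnone_s kv hkv (by rw [hkv1]; exact List.cons_prefix_cons.mpr ⟨hc3, hcw⟩)
              obtain ⟨z, hzne, hzsuf, hzrel⟩ := pvRepl_decomp k v t w hw hwnot
              have hzkv : z <:+ kv.1 := by
                rw [hkv1]; exact hzsuf.trans (List.suffix_cons c3 w)
              obtain ⟨p, hp2⟩ := hzkv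
              have hj : p.length < kv.1.length := by
                have := congrArg List.length hp2
                have hz1 : 1 ≤ z.length := List.length_pos_of_ne_nil hzne
                simp at this; omega
              have hCb := (hOK kv hkv).2.2 p.length hj
              rw [← hp2, List.drop_left] at hCb
              rcases hzrel with hz | hz
              · exact hCb.1 hz
              · exact hCb.2 hz
          have hfindfull : pvFindKey ((k, v) :: rest) (c :: t) = none := by
            unfold pvFindKey at hFK ⊢
            rw [List.find?_cons_of_neg (p := fun kv : List Char × List Char => kv.1.isPrefixOf (c :: t)) hA]
            exact hFK
          rw [hreplC, pvScan_cons_none rest c _ hnofind,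
            pvScan_cons_none _ c t hfindfull, ih t (by omega)]

theorem pvScan_nil_table : ∀ l, pvScan [] l = l := by
  intro l
  induction l with
  | nil => rw [pvScan]
  | cons c t ih =>
    rw [pvScan]
    have : pvFindKey [] (c :: t) = none := rfl
    rw [this]
    exact congrArg (c :: ·) ih

def pvChain (tbl : List (List Char × List Char)) (l : List Char) : List Char :=
  tbl.foldl (fun s kv => pvRepl kv.1 kv.2 s) l

theorem pvMain : ∀ tbl, pvGood tbl → ∀ s, pvChain tbl s = pvScan tbl s := by
  intro tbl
  induction tbl with
  | nil => intro _ s; simpa [pvChain] using (pvScan_nil_table s).symm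
  | cons hd rest ih =>
    obtain ⟨k, v⟩ := hd
    intro h s
    have h1 : pvChain rest (pvRepl k v s) = pvScan rest (pvRepl k v s) := ih h.2.2 _
    calc pvChain ((k, v) :: rest) s = pvChain rest (pvRepl k v s) := by simp [pvChain]
      _ = pvScan rest (pvRepl k v s) := h1
      _ = pvScan ((k, v) :: rest) s :=
          pvStep k v rest h.1 (pvGood_keys_ne rest h.2.2) h.2.1 s

theorem pvA_toList (text : String) :
    (simplify_technical_py text).toList = pvChain pvVoiceTable text.toList := by
  simp only [simplify_technical_py, List.foldl, pvChain, pvVoiceTable,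
    PySem.Str.toList_replace]
  rw [pvReplace_eq, pvReplace_eq, pvReplace_eq, pvReplace_eq, pvReplace_eq, pvReplace_eq]
  · rfl
  all_goals decide

-- ===== VERDICT (by name: the statement is the Claim_ definition above) =====
theorem simplify_technical_py_spec : Claim_equal_simplify_technical_py := by
  intro text _
  unfold Spec_simplify_technical_py
  have hB : simplify_technical_py_alt text = String.ofList (pvScan pvVoiceTable text.toList) := rfl
  rw [hB, ← pvMain pvVoiceTable pvGood_table, ← pvA_toList, String.ofList_toList]
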